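-- pv_equiv track=rewrite | github.com/jstck/aoc | 2024/07/solution.py | solve
-- ===== SOURCE A (Python) =====
-- def solve(result, accumulator, operands):
--     if len(operands)==0:
--         return result == accumulator
--     if accumulator > result:
--         return False
--
--     first, rest = operands[0], operands[1:]
--
--     mult = solve(result, accumulator*first, rest)
--     add = solve(result, accumulator+first, rest)
--
--     return mult or add
-- ===== SOURCE B (Python) =====
-- def solve(result, accumulator, operands):
--     frontier = {accumulator}
--     for op in operands:
--         nxt = set()
--         for v in frontier:
--             if v <= result:
--                 nxt.add(v * op)
--                 nxt.add(v + op)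
--         frontier = nxt
--     return result in frontier
-- ===== Notes on version B (the rewrite author's own statement) =====
-- stated objective: alternative
-- what changed: Replaced A's depth-first binary recursion over (+,*) choices by an iterative breadth-first frontier: a set of reachable accumulator values updated per operand, with the same prune (drop values > result) and a final membership test.
import Mathlib
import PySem

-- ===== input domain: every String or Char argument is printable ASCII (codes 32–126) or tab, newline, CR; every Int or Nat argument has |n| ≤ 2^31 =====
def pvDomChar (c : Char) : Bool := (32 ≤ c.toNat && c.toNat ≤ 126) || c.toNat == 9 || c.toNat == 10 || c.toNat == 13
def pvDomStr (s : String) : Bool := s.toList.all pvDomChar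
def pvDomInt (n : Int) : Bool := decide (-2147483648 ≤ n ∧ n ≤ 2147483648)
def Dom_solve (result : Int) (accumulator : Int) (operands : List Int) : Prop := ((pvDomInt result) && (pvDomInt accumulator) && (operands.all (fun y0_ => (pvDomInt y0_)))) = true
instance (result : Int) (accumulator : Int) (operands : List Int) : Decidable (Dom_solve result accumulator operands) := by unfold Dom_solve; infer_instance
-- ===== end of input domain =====

-- B replaces A's depth-first recursion over (+,*) choices by an iterative
-- level-by-level frontier of reachable accumulator values (a set, so duplicate
-- states collapse); objective: alternative decomposition.

-- ===== PORT A =====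
def solve (result : Int) (accumulator : Int) (operands : List Int) : Bool :=
  match operands with
  | [] => result == accumulator
  | first :: rest =>
    if accumulator > result then false
    else
      let mult := solve result (accumulator * first) rest
      let add := solve result (accumulator + first) rest
      mult || add

-- ===== PORT B =====
-- one pass of B's inner loop: next frontier from the current one and operand op
def solveStep (result : Int) (frontier : PySem.Set Int) (op : Int) : PySem.Set Int :=
  frontier.foldl (fun nxt v =>
    if v ≤ result then PySem.Set.add (PySem.Set.add nxt (v * op)) (v + op) else nxt)
    PySem.Set.empty

def solve_alt (result : Int) (accumulator : Int) (operands : List Int) : Bool :=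
  let final := operands.foldl (solveStep result) (PySem.Set.ofList [accumulator])
  PySem.Set.contains final result

-- ===== PRECONDITION & SPEC =====
def Spec_solve (result : Int) (accumulator : Int) (operands : List Int) (out : Bool) : Prop := out = solve_alt result accumulator operands
instance (result : Int) (accumulator : Int) (operands : List Int) (out : Bool) : Decidable (Spec_solve result accumulator operands out) := by unfold Spec_solve; infer_instance

-- ===== CLAIM (what is proved, stated in full; the proofs are below) =====
def Claim_equal_solve : Prop := ∀ (result : Int) (accumulator : Int) (operands : List Int), Dom_solve result accumulator operands → Spec_solve result accumulator operands (solve result accumulator operands)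

-- ===== LEMMAS AND PROOFS =====

-- membership in the inner fold of one step
theorem mem_solveStep_fold (result op : Int) (S : List Int) (init : List Int) (x : Int) :
    x ∈ S.foldl (fun nxt v =>
      if v ≤ result then PySem.Set.add (PySem.Set.add nxt (v * op)) (v + op) else nxt) init ↔
    x ∈ init ∨ ∃ v ∈ S, v ≤ result ∧ (x = v * op ∨ x = v + op) := by
  induction S generalizing init with
  | nil => simp
  | cons v S ih =>
    simp only [List.foldl_cons, ih, List.mem_cons]
    by_cases hv : v ≤ result
    · simp only [if_pos hv, PySem.Set.mem_add]
      constructor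
      · rintro (((h | h) | h) | ⟨w, hw, hwr, hx⟩)
        · exact Or.inl h
        · exact Or.inr ⟨v, Or.inl rfl, hv, Or.inl h⟩
        · exact Or.inr ⟨v, Or.inl rfl, hv, Or.inr h⟩
        · exact Or.inr ⟨w, Or.inr hw, hwr, hx⟩
      · rintro (h | ⟨w, (rfl | hw), hwr, hx⟩)
        · exact Or.inl (Or.inl (Or.inl h))
        · rcases hx with rfl | rfl
          · exact Or.inl (Or.inl (Or.inr rfl))
          · exact Or.inl (Or.inr rfl)
        · exact Or.inr ⟨w, hw, hwr, hx⟩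
    · simp only [if_neg hv]
      constructor
      · rintro (h | ⟨w, hw, hwr, hx⟩)
        · exact Or.inl h
        · exact Or.inr ⟨w, Or.inr hw, hwr, hx⟩
      · rintro (h | ⟨w, (rfl | hw), hwr, hx⟩)
        · exact Or.inl h
        · exact absurd hwr hv
        · exact Or.inr ⟨w, hw, hwr, hx⟩

theorem mem_solveStep (result op : Int) (S : PySem.Set Int) (x : Int) :
    x ∈ solveStep result S op ↔ ∃ v ∈ S, v ≤ result ∧ (x = v * op ∨ x = v + op) := by
  unfold solveStep
  rw [mem_solveStep_fold]
  simp [PySem.Set.empty]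

-- main invariant: result is in the frontier after processing ops iff
-- some value of the current frontier solves the rest depth-first
theorem frontier_invariant (result : Int) (ops : List Int) (S : List Int) :
    PySem.Set.contains (ops.foldl (solveStep result) S) result
      = S.any (fun v => solve result v ops) := by
  induction ops generalizing S with
  | nil =>
    simp only [List.foldl_nil, solve]
    rw [Bool.eq_iff_iff]
    simp only [PySem.Set.contains_iff, List.any_eq_true, beq_iff_eq]
    exact ⟨fun h => ⟨result, h, rfl⟩, fun ⟨v, hv, h⟩ => h ▸ hv⟩
  | cons op rest ih =>
    simp only [List.foldl_cons, ih]
    rw [Bool.eq_iff_iff]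
    simp only [List.any_eq_true, solve]
    constructor
    · rintro ⟨x, hx, hsx⟩
      rcases (mem_solveStep result op S x).1 hx with ⟨v, hv, hvr, rfl | rfl⟩
      · exact ⟨v, hv, by simp [if_neg (not_lt.2 hvr), hsx]⟩
      · exact ⟨v, hv, by simp [if_neg (not_lt.2 hvr), hsx]⟩
    · rintro ⟨v, hv, hsv⟩
      by_cases hvr : v > result
      · simp [if_pos hvr] at hsv
      · simp only [if_neg hvr, Bool.or_eq_true] at hsv
        rcases hsv with h | h
        · exact ⟨v * op, (mem_solveStep result op S _).2 ⟨v, hv, not_lt.1 hvr, Or.inl rfl⟩, h⟩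
        · exact ⟨v + op, (mem_solveStep result op S _).2 ⟨v, hv, not_lt.1 hvr, Or.inr rfl⟩, h⟩

-- ===== VERDICT (by name: the statement is the Claim_ definition above) =====
theorem solve_spec : Claim_equal_solve := by
  intro result accumulator operands _
  unfold Spec_solve solve_alt
  rw [frontier_invariant]
  simp [PySem.Set.ofList]
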